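-- pv_equiv track=rewrite | github.com/millstar324/2026-CT_Study | [DAY3] LV2_비밀_코드_해독/비밀_코드_해독_황민서.py | solution
-- ===== SOURCE A (Python) =====
-- from itertools import combinations
--
-- def solution(n, q, ans):
--     count = 0
--     # 1부터 n까지의 숫자 중 5개를 뽑는 모든 조합을 생성.
--     for candidate in combinations(range(1, n + 1), 5):
--         is_possible = True
--
--         # 각 시도(q)와 시스템 응답(ans)이 일치하는지 확인.
--         for i in range(len(q)):
--             # 현재 조합(candidate)과 입력한 정수(q[i]) 사이의 교집합 개수를 구한다.
--             # set을 활용하면 교집합 개수를 빠르게 구할 수 있음.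
--             match_count = len(set(candidate) & set(q[i]))
--
--             # 시스템의 응답과 일치하지 않으면 이 조합은 비밀 코드가 될 수 없음.
--             if match_count != ans[i]:
--                 is_possible = False
--                 break
--
--         # 모든 시도 조건을 만족하면 카운트를 증가시킨다.
--         if is_possible:
--             count += 1
--
--     return count
-- ===== SOURCE B (Python) =====
-- def solution(n, q, ans):
--     # Backtracking: pick the 5 code numbers in increasing order, one recursion
--     # level per pick, carrying for each query the remaining required
--     # intersection count and pruning any branch that drives one negative.
--     sets = [set(qi) for qi in q]
--     need = list(ans[:len(q)])
--
--     def count(start, r, need):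
--         if r == 0:
--             return 1 if all(v == 0 for v in need) else 0
--         total = 0
--         for j in range(start, n - r + 2):
--             need2 = [v - (1 if j in s else 0) for v, s in zip(need, sets)]
--             if all(v >= 0 for v in need2):
--                 total += count(j + 1, r - 1, need2)
--         return total
--
--     return count(1, 5, need)
-- ===== Notes on version B (the rewrite author's own statement) =====
-- stated objective: faster
-- what changed: B replaces A's exhaustive enumeration of all 5-combinations (each tested against every query with an early break) by depth-5 backtracking that picks the code numbers in increasing order, carrying per query the remaining required intersection count and pruning any branch that drives a requirement negative.
-- outside the precondition, e.g. on solution(5, [[1], [2]], [1]): A raises IndexError, B returns 1; on solution(5, [[6], [1]], [1]): A returns 0, B returns 0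
import Mathlib
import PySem

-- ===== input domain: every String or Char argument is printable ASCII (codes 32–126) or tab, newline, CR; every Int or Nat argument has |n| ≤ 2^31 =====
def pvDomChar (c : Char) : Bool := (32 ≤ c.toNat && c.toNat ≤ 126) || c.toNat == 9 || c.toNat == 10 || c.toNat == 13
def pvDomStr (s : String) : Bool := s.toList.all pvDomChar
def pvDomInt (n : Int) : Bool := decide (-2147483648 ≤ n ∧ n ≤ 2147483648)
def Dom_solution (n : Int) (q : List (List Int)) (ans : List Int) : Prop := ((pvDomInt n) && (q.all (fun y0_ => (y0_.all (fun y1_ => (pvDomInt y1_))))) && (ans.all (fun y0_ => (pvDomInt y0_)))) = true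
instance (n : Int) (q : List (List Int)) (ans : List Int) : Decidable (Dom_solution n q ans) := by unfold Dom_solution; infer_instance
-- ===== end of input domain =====

-- B replaces A's enumeration of all 5-combinations by pruned depth-5
-- backtracking carrying per-query remaining intersection requirements.

-- ===== PORT A =====
-- itertools.combinations(xs, 5) in lexicographic order
def combos : Nat → List Int → List (List Int)
  | 0, _ => [[]]
  | _ + 1, [] => []
  | k + 1, x :: xs => (combos k xs).map (fun c => x :: c) ++ combos (k + 1) xs

-- len(set(candidate) & set(qi))
def matchCount (cand qi : List Int) : Int :=
  PySem.Set.len (PySem.Set.inter (PySem.Set.ofList cand) (PySem.Set.ofList qi))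

-- A's inner loop: for i in range(len(q)): … if match_count != ans[i]: break
-- (q[i] and ans[i] walked in step; Pre_ guarantees ans is long enough)
def checkA (cand : List Int) : List (List Int) → List Int → Bool
  | qi :: qs, a :: as => if matchCount cand qi ≠ a then false else checkA cand qs as
  | _, _ => true

def solution (n : Int) (q : List (List Int)) (ans : List Int) : Int :=
  (combos 5 (PySem.List.pyRange 1 (n + 1) 1)).foldl
    (fun count cand => if checkA cand q ans then count + 1 else count) 0

-- ===== PORT B =====
-- Source B's inner recursion count(start, r, need): r only ever takes the values
-- 5,4,...,0 (decremented under r != 0), so it is carried as a Nat.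
def countB (n : Int) (sets : List (PySem.Set Int)) (start : Int) (r : Nat) (need : List Int) : Int :=
  if r = 0 then (if need.all (fun v => v == 0) then 1 else 0)
  else
    (PySem.List.pyRange start (n - (r : Int) + 2) 1).foldl
      (fun total j =>
        let need2 := (need.zip sets).map
          (fun p => p.1 - (if PySem.Set.contains p.2 j then 1 else 0))
        if need2.all (fun v => 0 ≤ v) then total + countB n sets (j + 1) (r - 1) need2
        else total) 0
termination_by r
decreasing_by omega

def solution_alt (n : Int) (q : List (List Int)) (ans : List Int) : Int :=
  let sets := q.map (fun qi => PySem.Set.ofList qi)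
  let need := PySem.List.slice ans none (some (PySem.List.len q))
  countB n sets 1 5 need

-- ===== PRECONDITION & SPEC =====
-- Pre_ excludes inputs with fewer answers than queries: there A hits ans[i]
-- out of range and raises IndexError whenever a candidate survives that far,
-- while B silently ignores the unanswered queries; n < 5 (no candidates) is
-- kept since A then loops over nothing. When n ≥ 5, ans is short and every
-- candidate happens to die before the answers run out, both return the same
-- value, but that condition is not closed-form, so such inputs stay excluded
-- (e.g. the cited (5, [[6], [1]], [1])).
def Pre_solution (n : Int) (q : List (List Int)) (ans : List Int) : Prop :=
  q.length ≤ ans.length ∨ n < 5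
instance (n : Int) (q : List (List Int)) (ans : List Int) : Decidable (Pre_solution n q ans) := by unfold Pre_solution; infer_instance
def pvWitness_solution : Int × List (List Int) × List Int := (6, [[1, 2, 7]], [2])
def Spec_solution (n : Int) (q : List (List Int)) (ans : List Int) (out : Int) : Prop := out = solution_alt n q ans
instance (n : Int) (q : List (List Int)) (ans : List Int) (out : Int) : Decidable (Spec_solution n q ans out) := by unfold Spec_solution; infer_instance

-- ===== CLAIM (what is proved, stated in full; the proofs are below) =====
def Claim_equal_solution : Prop := ∀ (n : Int) (q : List (List Int)) (ans : List Int), Dom_solution n q ans → Pre_solution n q ans → Spec_solution n q ans (solution n q ans)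

-- ===== LEMMAS AND PROOFS =====

-- number of elements of c lying in the set s
def countIn (c : List Int) (s : PySem.Set Int) : Int :=
  ((c.filter (fun x => PySem.Set.contains s x)).length : Int)

-- the per-candidate predicate B's requirements express
def chk (c : List Int) (pairs : List (Int × PySem.Set Int)) : Bool :=
  pairs.all (fun p => decide (countIn c p.2 = p.1))

theorem chk_pair_cons (c : List Int) (p : Int × PySem.Set Int)
    (ps : List (Int × PySem.Set Int)) :
    chk c (p :: ps) = (decide (countIn c p.2 = p.1) && chk c ps) := by
  simp [chk]

-- counting fold = length of filter
theorem foldl_count_eq_length_filter (p : List Int → Bool) :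
    ∀ (l : List (List Int)) (k : Int),
      l.foldl (fun count cand => if p cand then count + 1 else count) k
        = k + (l.filter p).length := by
  intro l
  induction l with
  | nil => intro k; simp
  | cons c cs ih =>
    intro k
    by_cases h : p c = true
    · simp [List.foldl, List.filter, h, ih]; ring
    · simp [List.foldl, List.filter, h, ih]

theorem checkA_cons (c qi : List Int) (a : Int) (qs : List (List Int)) (as : List Int) :
    checkA c (qi :: qs) (a :: as) = (decide (matchCount c qi = a) && checkA c qs as) := by
  simp only [checkA]
  by_cases h : matchCount c qi = a <;> simp [h]

-- fewer than k numbers admit no k-combination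
theorem combos_eq_nil : ∀ (xs : List Int) (k : Nat), xs.length < k → combos k xs = [] := by
  intro xs
  induction xs with
  | nil =>
    intro k h
    cases k with
    | zero => omega
    | succ k => rfl
  | cons x xs ih =>
    intro k h
    cases k with
    | zero => omega
    | succ k =>
      have h' : xs.length < k := by simp at h; omega
      simp only [combos, ih k h', ih (k + 1) (by omega)]
      simp

-- every combination is a sublist of the pool
theorem combos_sublist : ∀ (k : Nat) (xs c : List Int), c ∈ combos k xs → c.Sublist xs := by
  intro k
  induction k with
  | zero => intro xs c hc; simp [combos] at hc; simp [hc]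
  | succ k ih =>
    intro xs
    induction xs with
    | nil => intro c hc; simp [combos] at hc
    | cons x xs ihx =>
      intro c hc
      simp only [combos, List.mem_append, List.mem_map] at hc
      rcases hc with ⟨c', hc', rfl⟩ | hc
      · exact List.Sublist.cons₂ x (ih xs c' hc')
      · exact List.Sublist.cons x (ihx c hc)

-- matchCount on a duplicate-free candidate is countIn
theorem matchCount_eq_countIn (c qi : List Int) (hc : c.Nodup) :
    matchCount c qi = countIn c (PySem.Set.ofList qi) := by
  unfold matchCount countIn
  rw [PySem.Set.ofList_eq_self_of_nodup c hc]
  simp [PySem.Set.inter, PySem.Set.len]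

-- A's check equals B's predicate on the zipped requirements
theorem checkA_eq_chk (c : List Int) (hc : c.Nodup) :
    ∀ (q : List (List Int)) (ans : List Int), q.length ≤ ans.length →
      checkA c q ans
        = chk c ((ans.take q.length).zip (q.map (fun qi => PySem.Set.ofList qi))) := by
  intro q
  induction q with
  | nil => intro ans h; simp [checkA, chk]
  | cons qi qs ih =>
    intro ans h
    cases ans with
    | nil => simp at h
    | cons a as =>
      rw [checkA_cons]
      simp only [List.length_cons, List.take_succ_cons, List.map_cons, List.zip_cons_cons]
      rw [chk_pair_cons, ih as (by simpa using h), matchCount_eq_countIn c qi hc]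

-- adding i to the candidate shifts each requirement by i's membership indicator
theorem countIn_cons (i : Int) (c : List Int) (s : PySem.Set Int) :
    countIn (i :: c) s = countIn c s + (if PySem.Set.contains s i then 1 else 0) := by
  unfold countIn
  by_cases h : i ∈ s <;> simp [List.filter, h]

theorem chk_cons (i : Int) (c : List Int) :
    ∀ (need : List Int) (sets : List (PySem.Set Int)),
      chk (i :: c) (need.zip sets)
        = chk c (((need.zip sets).map
            (fun p => p.1 - (if PySem.Set.contains p.2 i then 1 else 0))).zip sets) := by
  intro need
  induction need with
  | nil => intro sets; simp [chk]
  | cons v vs ih =>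
    intro sets
    cases sets with
    | nil => simp [chk]
    | cons s ss =>
      rw [List.zip_cons_cons, chk_pair_cons, List.map_cons, List.zip_cons_cons,
          chk_pair_cons, ← ih ss]
      congr 1
      rw [countIn_cons]
      by_cases h : PySem.Set.contains s i = true <;>
        simp only [h, if_true, decide_eq_decide] <;> omega

-- a negative requirement can never be met
theorem chk_eq_false_of_neg (c : List Int) :
    ∀ (need : List Int) (sets : List (PySem.Set Int)),
      need.length ≤ sets.length → ¬ need.all (fun v => 0 ≤ v) →
      chk c (need.zip sets) = false := by
  intro need
  induction need with
  | nil => intro sets _ h; simp at h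
  | cons v vs ih =>
    intro sets hlen h
    cases sets with
    | nil => simp at hlen
    | cons s ss =>
      simp only [List.all_cons, Bool.and_eq_true, not_and] at h
      rw [List.zip_cons_cons, chk_pair_cons]
      rw [Bool.and_eq_false_iff]
      by_cases hv : (0 : Int) ≤ v
      · right
        exact ih ss (by simpa using hlen) (by simpa [hv] using h)
      · left
        simp only [decide_eq_false_iff_not]
        intro hEq
        have : (0 : Int) ≤ countIn c s := by unfold countIn; positivity
        omega

-- all-zero requirements are exactly what the empty candidate meets
theorem chk_nil (need : List Int) :
    ∀ (sets : List (PySem.Set Int)), need.length = sets.length →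
      chk [] (need.zip sets) = need.all (fun v => v == 0) := by
  induction need with
  | nil => intro sets _; simp [chk]
  | cons v vs ih =>
    intro sets hlen
    cases sets with
    | nil => simp at hlen
    | cons s ss =>
      rw [List.zip_cons_cons, chk_pair_cons, ih ss (by simpa using hlen),
          List.all_cons]
      congr 1
      rw [show countIn [] s = 0 from rfl]
      by_cases h : v = 0
      · simp [h]
      · simp [h, Ne.symm h]

-- the additive fold shifts its accumulator out
theorem foldl_if_shift (cond : Int → Bool) (g : Int → Int) :
    ∀ (l : List Int) (a : Int),
      l.foldl (fun t j => if cond j then t + g j else t) a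
        = a + l.foldl (fun t j => if cond j then t + g j else t) 0 := by
  intro l
  induction l with
  | nil => intro a; simp
  | cons x xs ih =>
    intro a
    simp only [List.foldl_cons]
    by_cases h : cond x = true
    · rw [if_pos h, if_pos h, ih (a + g x), ih (0 + g x)]
      ring
    · rw [if_neg h, if_neg h, ih a]

-- B's recursion counts the surviving combinations drawn from start..n
theorem countB_eq (n : Int) (sets : List (PySem.Set Int)) :
    ∀ (m : Nat) (start : Int) (r : Nat) (need : List Int),
      (n + 1 - start).toNat = m → need.length = sets.length →
      countB n sets start r need
        = (((combos r (PySem.List.pyRange start (n + 1) 1)).filter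
            (fun c => chk c (need.zip sets))).length : Int) := by
  intro m
  induction m using Nat.strong_induction_on with
  | _ m IH =>
    intro start r need hm hlen
    rw [countB]
    by_cases hr : r = 0
    · subst hr
      rw [if_pos rfl]
      simp only [combos]
      rw [show (List.filter (fun c => chk c (need.zip sets)) [[]])
            = if chk [] (need.zip sets) then [[]] else [] from by
          by_cases h : chk [] (need.zip sets) = true <;> simp [List.filter, h]]
      rw [chk_nil need sets hlen]
      by_cases h : need.all (fun v => v == 0) <;> simp [h]
    · rw [if_neg hr]
      obtain ⟨r', rfl⟩ : ∃ r', r = r' + 1 := ⟨r - 1, by omega⟩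
      by_cases hs : start < n - r' + 1
      · -- the loop range and the pool are both nonempty: peel off j = start
        have hpool : start < n + 1 := by omega
        have hmpos : 0 < m := by omega
        have hmlt : (n + 1 - (start + 1)).toNat < m := by omega
        rw [PySem.List.pyRange_one_cons
              (show start < n - ((r' + 1 : Nat) : Int) + 2 by push_cast; omega)]
        rw [List.foldl_cons]
        rw [show ((fun total j =>
              let need2 := (need.zip sets).map
                (fun p => p.1 - (if PySem.Set.contains p.2 j then 1 else 0))
              if need2.all (fun v => 0 ≤ v) then
                total + countB n sets (j + 1) (r' + 1 - 1) need2
              else total) : Int → Int → Int)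
            = (fun t j => if ((need.zip sets).map
                (fun p => p.1 - (if PySem.Set.contains p.2 j then 1 else 0))).all
                  (fun v => 0 ≤ v) then
                t + countB n sets (j + 1) r' ((need.zip sets).map
                  (fun p => p.1 - (if PySem.Set.contains p.2 j then 1 else 0)))
              else t) from rfl]
        rw [foldl_if_shift]
        -- the tail of the fold is countB at start + 1
        rw [show (PySem.List.pyRange (start + 1) (n - ((r' + 1 : Nat) : Int) + 2) 1).foldl
              (fun t j => if ((need.zip sets).map
                (fun p => p.1 - (if PySem.Set.contains p.2 j then 1 else 0))).all
                  (fun v => 0 ≤ v) then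
                t + countB n sets (j + 1) r' ((need.zip sets).map
                  (fun p => p.1 - (if PySem.Set.contains p.2 j then 1 else 0)))
              else t) 0
            = countB n sets (start + 1) (r' + 1) need from by
          rw [countB, if_neg hr]
          rfl]
        rw [IH _ hmlt (start + 1) (r' + 1) need rfl hlen]
        -- the pool side: split off the combinations that contain start
        rw [PySem.List.pyRange_one_cons hpool]
        simp only [combos, List.filter_append, List.length_append]
        set need2 := (need.zip sets).map
          (fun p => p.1 - (if PySem.Set.contains p.2 start then 1 else 0)) with hneed2
        have hlen2 : need2.length = sets.length := by
          simp only [hneed2, List.length_map, List.length_zip]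
          omega
        have hmap : ((combos r' (PySem.List.pyRange (start + 1) (n + 1) 1)).map
              (fun c => start :: c)).filter (fun c => chk c (need.zip sets))
            = ((combos r' (PySem.List.pyRange (start + 1) (n + 1) 1)).filter
              (fun c => chk c (need2.zip sets))).map (fun c => start :: c) := by
          rw [List.filter_map]
          congr 1
          apply List.filter_congr
          intro c _
          simp only [Function.comp]
          rw [chk_cons start c need sets]
        rw [hmap]
        by_cases hpos : need2.all (fun v => 0 ≤ v)
        · rw [if_pos hpos]
          simp only [Nat.add_sub_cancel]
          rw [IH _ hmlt (start + 1) r' need2 rfl hlen2]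
          simp only [List.length_map]
          push_cast
          ring
        · rw [if_neg hpos]
          have hempty : (combos r' (PySem.List.pyRange (start + 1) (n + 1) 1)).filter
              (fun c => chk c (need2.zip sets)) = [] := by
            apply List.filter_eq_nil_iff.mpr
            intro c _
            simp [chk_eq_false_of_neg c need2 sets (le_of_eq hlen2) (by simpa using hpos)]
          rw [hempty]
          simp
      · -- the loop range is empty and the pool is too short for r' + 1 picks
        rw [PySem.List.pyRange_one_eq_nil
              (show n - ((r' + 1 : Nat) : Int) + 2 ≤ start by push_cast; omega)]
        rw [combos_eq_nil _ (r' + 1)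
              (by rw [PySem.List.length_pyRange_one]; omega)]
        simp

theorem solution_spec : Claim_equal_solution := by
  intro n q ans _ hpre
  unfold Spec_solution solution solution_alt
  rcases hpre with hq | hn
  · have hslice : PySem.List.slice ans none (some (PySem.List.len q)) = ans.take q.length := by
      simp [PySem.List.slice_to_natCast ans q.length]
    rw [hslice]
    rw [countB_eq n (q.map (fun qi => PySem.Set.ofList qi)) (n + 1 - 1).toNat 1 5
          (ans.take q.length) rfl (by simp; omega)]
    rw [foldl_count_eq_length_filter (fun c => checkA c q ans)]
    rw [List.filter_congr (fun c hc => by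
      rw [checkA_eq_chk c
            (((PySem.List.nodup_pyRange_one 1 (n+1)).sublist (combos_sublist 5 _ c hc)))
            q ans hq])]
    simp
  · have hnil : combos 5 (PySem.List.pyRange 1 (n + 1) 1) = [] := by
      apply combos_eq_nil
      rw [PySem.List.length_pyRange_one]
      show _ < 5
      omega
    rw [hnil]
    show (0 : Int) = countB n _ 1 5 _
    rw [countB, if_neg (by omega),
        PySem.List.pyRange_one_eq_nil (show n - ((5 : Nat) : Int) + 2 ≤ 1 by push_cast; omega)]
    rfl
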